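-- pv_equiv track=rewrite | github.com/tuva-health/tuva | scripts/check_metadata_description_length.py | fold_block_lines
-- ===== SOURCE A (Python) =====
-- from typing import Iterable, Iterator, Sequence
--
-- def fold_block_lines(lines: Sequence[str]) -> str:
--     parts: list[str] = []
--     previous_blank = True
--
--     for raw_line in lines:
--         if raw_line.strip() == "":
--             parts.append("\n")
--             previous_blank = True
--             continue
--
--         line = raw_line.strip()
--         if not parts:
--             parts.append(line)
--         elif previous_blank:
--             parts.append(line)
--         else:
--             parts.append(f" {line}")
--         previous_blank = False
--
--     return "".join(parts)
-- ===== SOURCE B (Python) =====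
-- from itertools import groupby
--
--
-- def fold_block_lines(lines):
--     segments = []
--     for blank, run in groupby(lines, key=lambda l: l.strip() == ""):
--         run = list(run)
--         if blank:
--             segments.append("\n" * len(run))
--         else:
--             segments.append(" ".join(l.strip() for l in run))
--     return "".join(segments)
-- ===== Notes on version B (the rewrite author's own statement) =====
-- stated objective: alternative
-- what changed: Replaces the stateful single pass with a previous_blank flag and conditional space-prefixing by an itertools.groupby decomposition: lines are grouped into maximal blank/non-blank runs, each run is mapped to its segment ('\n' per blank line, stripped lines space-joined for a non-blank run), and the segments are concatenated.
import Mathlib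
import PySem

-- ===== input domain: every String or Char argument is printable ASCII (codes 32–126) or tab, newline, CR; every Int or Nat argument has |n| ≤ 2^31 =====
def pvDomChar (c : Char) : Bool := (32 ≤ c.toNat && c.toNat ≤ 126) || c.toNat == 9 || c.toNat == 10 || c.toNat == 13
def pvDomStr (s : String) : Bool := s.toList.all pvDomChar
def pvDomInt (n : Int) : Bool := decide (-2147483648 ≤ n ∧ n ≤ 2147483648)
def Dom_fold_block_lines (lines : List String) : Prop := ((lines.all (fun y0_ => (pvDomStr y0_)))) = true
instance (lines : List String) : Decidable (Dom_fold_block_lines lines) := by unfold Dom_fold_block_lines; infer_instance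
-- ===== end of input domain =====

-- B replaces A's stateful previous_blank single pass by a group-into-maximal-runs
-- decomposition (blank runs -> "\n" per line, non-blank runs -> space-joined stripped
-- lines), an alternative of the same cost.


-- ===== PORT A =====
-- strings are handled as their code-point lists (PySem.Chars is exact there)
def pvStepA (acc : List (List Char) × Bool) (raw : String) : List (List Char) × Bool :=
  if PySem.Chars.strip raw.toList = [] then (acc.1 ++ [['\n']], true)
  else
    let line := PySem.Chars.strip raw.toList
    if acc.1 = [] then (acc.1 ++ [line], false)
    else if acc.2 then (acc.1 ++ [line], false)
    else (acc.1 ++ [' ' :: line], false)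

def fold_block_lines (lines : List String) : String :=
  String.ofList (PySem.Chars.join [] (lines.foldl pvStepA ([], true)).1)

-- ===== PORT B =====
-- groupby's key: is the stripped line empty?
def pvBlank (l : String) : Bool := PySem.Chars.strip l.toList = []

-- the longest prefix whose key equals b, and the remainder (one groupby step)
def pvTakeRun (b : Bool) : List String → List String × List String
  | [] => ([], [])
  | x :: xs =>
    if pvBlank x = b then ((x :: (pvTakeRun b xs).1), (pvTakeRun b xs).2)
    else ([], x :: xs)

-- itertools.groupby: the maximal runs with their keys (fuel = length, for structural recursion)
def pvGroupsF : Nat → List String → List (Bool × List String)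
  | _, [] => []
  | 0, _ :: _ => []
  | n + 1, x :: xs =>
    (pvBlank x, x :: (pvTakeRun (pvBlank x) xs).1) :: pvGroupsF n (pvTakeRun (pvBlank x) xs).2

-- one segment per run: '\n' per blank line, stripped lines space-joined otherwise
def pvSegment (g : Bool × List String) : List Char :=
  if g.1 then PySem.Chars.join [] (List.replicate g.2.length ['\n'])
  else PySem.Chars.join [' '] (g.2.map (fun l => PySem.Chars.strip l.toList))

def fold_block_lines_alt (lines : List String) : String :=
  String.ofList (PySem.Chars.join [] ((pvGroupsF lines.length lines).map pvSegment))

-- ===== PRECONDITION & SPEC =====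
def Spec_fold_block_lines (lines : List String) (out : String) : Prop := out = fold_block_lines_alt lines
instance (lines : List String) (out : String) : Decidable (Spec_fold_block_lines lines out) := by unfold Spec_fold_block_lines; infer_instance

-- ===== CLAIM (what is proved, stated in full; the proofs are below) =====
def Claim_equal_fold_block_lines : Prop := ∀ (lines : List String), Dom_fold_block_lines lines → Spec_fold_block_lines lines (fold_block_lines lines)

-- ===== LEMMAS AND PROOFS =====

-- the common recursive characterisation: prev = "was the previous line blank (or none yet)?"
def pvG : Bool → List String → List Char
  | _, [] => []
  | prev, x :: xs =>
    if pvBlank x then '\n' :: pvG true xs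
    else (if prev then PySem.Chars.strip x.toList else ' ' :: PySem.Chars.strip x.toList)
      ++ pvG false xs

theorem pvJoin0_cons (c : List Char) (l : List (List Char)) :
    PySem.Chars.join [] (c :: l) = c ++ PySem.Chars.join [] l := by
  cases l with
  | nil => simp [PySem.Chars.join_singleton]
  | cons b t => simp [PySem.Chars.join_cons_cons]

theorem pvJoin0_append (l₁ l₂ : List (List Char)) :
    PySem.Chars.join [] (l₁ ++ l₂) = PySem.Chars.join [] l₁ ++ PySem.Chars.join [] l₂ := by
  induction l₁ with
  | nil => simp [PySem.Chars.join_nil]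
  | cons a t ih => simp [pvJoin0_cons, ih]

theorem pvJoinSp_cons (c : List Char) (l : List (List Char)) :
    PySem.Chars.join [' '] (c :: l) = c ++ PySem.Chars.join [] (l.map (' ' :: ·)) := by
  induction l generalizing c with
  | nil => simp [PySem.Chars.join_singleton, PySem.Chars.join_nil]
  | cons b t ih =>
    rw [PySem.Chars.join_cons_cons, ih b, List.map_cons, pvJoin0_cons]
    simp

-- A's fold computes pvG (given the invariant: empty parts implies prev)
theorem pvFoldA_eq_g (lines : List String) :
    ∀ (parts : List (List Char)) (prev : Bool), (parts = [] → prev = true) →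
      PySem.Chars.join [] (lines.foldl pvStepA (parts, prev)).1
        = PySem.Chars.join [] parts ++ pvG prev lines := by
  induction lines with
  | nil => intro parts prev _; simp [pvG]
  | cons x xs ih =>
    intro parts prev hinv
    rw [List.foldl_cons]
    by_cases hb : PySem.Chars.strip x.toList = []
    · rw [show pvStepA (parts, prev) x = (parts ++ [['\n']], true) from by simp [pvStepA, hb]]
      rw [ih _ true (fun _ => rfl), pvJoin0_append, pvJoin0_cons]
      simp [pvG, pvBlank, hb, PySem.Chars.join_nil]
    · have hgb : pvBlank x = false := by simp [pvBlank, hb]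
      by_cases hp : parts = []
      · have hprev := hinv hp
        subst hp; subst hprev
        rw [show pvStepA ([], true) x = ([PySem.Chars.strip x.toList], false) from by
          simp [pvStepA, hb]]
        rw [ih _ false (by simp)]
        simp [pvG, hgb, PySem.Chars.join_nil]
      · cases prev with
        | true =>
          rw [show pvStepA (parts, true) x = (parts ++ [PySem.Chars.strip x.toList], false) from by
            simp [pvStepA, hb, hp]]
          rw [ih _ false (by simp [hp]), pvJoin0_append, pvJoin0_cons]
          simp [pvG, hgb, PySem.Chars.join_nil]
        | false =>
          rw [show pvStepA (parts, false) x = (parts ++ [' ' :: PySem.Chars.strip x.toList], false)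
            from by simp [pvStepA, hb, hp]]
          rw [ih _ false (by simp [hp]), pvJoin0_append, pvJoin0_cons]
          simp [pvG, hgb, PySem.Chars.join_nil]

theorem pvTakeRun_rest_le (b : Bool) (xs : List String) :
    (pvTakeRun b xs).2.length ≤ xs.length := by
  induction xs with
  | nil => simp [pvTakeRun]
  | cons x t ih =>
    simp only [pvTakeRun]
    split
    · exact Nat.le_succ_of_le ih
    · simp

theorem pvTakeRun_spec (b : Bool) (xs : List String) :
    xs = (pvTakeRun b xs).1 ++ (pvTakeRun b xs).2 ∧
      (∀ y ∈ (pvTakeRun b xs).1, pvBlank y = b) ∧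
      (∀ y t, (pvTakeRun b xs).2 = y :: t → pvBlank y ≠ b) := by
  induction xs with
  | nil => simp [pvTakeRun]
  | cons x t ih =>
    by_cases h : pvBlank x = b
    · simp only [pvTakeRun, if_pos h]
      refine ⟨?_, ?_, ih.2.2⟩
      · simpa using ih.1
      · intro y hy
        rcases List.mem_cons.mp hy with hy | hy
        · simpa [hy] using h
        · exact ih.2.1 y hy
    · simp only [pvTakeRun, if_neg h]
      exact ⟨rfl, by simp, by intro y s hys; cases hys; simpa using h⟩

-- pvG over a run of blank lines, starting with prev = true
theorem pvG_blank_run (run : List String) (rest : List String)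
    (h : ∀ y ∈ run, pvBlank y = true) :
    pvG true (run ++ rest) =
      PySem.Chars.join [] (List.replicate run.length ['\n']) ++ pvG true rest := by
  induction run with
  | nil => simp [PySem.Chars.join_nil]
  | cons x t ih =>
    have hx : pvBlank x = true := h x (by simp)
    rw [List.cons_append, show pvG true (x :: (t ++ rest)) = '\n' :: pvG true (t ++ rest) from by
      simp [pvG, hx]]
    rw [ih (fun y hy => h y (by simp [hy]))]
    simp [List.replicate_succ, pvJoin0_cons]

-- pvG over a run of non-blank lines, with prev = false
theorem pvG_nonblank_run (run : List String) (rest : List String)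
    (h : ∀ y ∈ run, pvBlank y = false) :
    pvG false (run ++ rest) =
      PySem.Chars.join [] (run.map (fun y => ' ' :: PySem.Chars.strip y.toList))
        ++ pvG false rest := by
  induction run with
  | nil => simp [PySem.Chars.join_nil]
  | cons x t ih =>
    have hx : pvBlank x = false := h x (by simp)
    rw [List.cons_append, show pvG false (x :: (t ++ rest))
        = (' ' :: PySem.Chars.strip x.toList) ++ pvG false (t ++ rest) from by simp [pvG, hx]]
    rw [ih (fun y hy => h y (by simp [hy]))]
    simp [pvJoin0_cons]

-- after a group the remainder starts blank (or is empty), so prev does not matter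
theorem pvG_false_eq_true (rest : List String)
    (h : rest = [] ∨ ∃ y t, rest = y :: t ∧ pvBlank y = true) :
    pvG false rest = pvG true rest := by
  rcases h with rfl | ⟨y, t, rfl, hy⟩
  · rfl
  · simp [pvG, hy]

-- B's grouped segments compute pvG true (for any sufficient fuel)
theorem pvGroupsF_eq_g (n : Nat) : ∀ (lines : List String), lines.length ≤ n →
    PySem.Chars.join [] ((pvGroupsF n lines).map pvSegment) = pvG true lines := by
  induction n with
  | zero =>
    intro lines h
    have : lines = [] := List.eq_nil_of_length_eq_zero (Nat.le_zero.mp h)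
    subst this
    simp [pvGroupsF, pvG, PySem.Chars.join_nil]
  | succ n ih =>
    intro lines h
    match lines with
    | [] => simp [pvGroupsF, pvG, PySem.Chars.join_nil]
    | x :: xs =>
      obtain ⟨hsplit, hall, hstop⟩ := pvTakeRun_spec (pvBlank x) xs
      have hrest_le : (pvTakeRun (pvBlank x) xs).2.length ≤ n := by
        have := pvTakeRun_rest_le (pvBlank x) xs
        simp at h; omega
      have hrest := ih (pvTakeRun (pvBlank x) xs).2 hrest_le
      have halt : PySem.Chars.join [] ((pvGroupsF (n + 1) (x :: xs)).map pvSegment)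
          = pvSegment (pvBlank x, x :: (pvTakeRun (pvBlank x) xs).1)
            ++ PySem.Chars.join [] ((pvGroupsF n (pvTakeRun (pvBlank x) xs).2).map pvSegment) := by
        rw [pvGroupsF, List.map_cons, pvJoin0_cons]
      cases hxb : pvBlank x with
      | true =>
        rw [hxb] at halt hsplit hall hstop hrest
        rw [halt, hrest,
          show pvSegment (true, x :: (pvTakeRun true xs).1)
            = PySem.Chars.join [] (List.replicate (x :: (pvTakeRun true xs).1).length ['\n'])
            from by simp [pvSegment],
          show pvG true (x :: xs) = '\n' :: pvG true xs from by simp [pvG, hxb]]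
        conv_rhs => rw [hsplit]
        rw [pvG_blank_run _ _ hall]
        simp [List.replicate_succ, pvJoin0_cons]
      | false =>
        rw [hxb] at halt hsplit hall hstop hrest
        have hprev : pvG false (pvTakeRun false xs).2 = pvG true (pvTakeRun false xs).2 := by
          apply pvG_false_eq_true
          match hr : (pvTakeRun false xs).2 with
          | [] => exact Or.inl rfl
          | y :: t =>
            refine Or.inr ⟨y, t, rfl, ?_⟩
            have := hstop y t hr
            cases hyb : pvBlank y with
            | true => rfl
            | false => exact absurd hyb this
        rw [halt, hrest,
          show pvSegment (false, x :: (pvTakeRun false xs).1)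
            = PySem.Chars.join [' ']
                ((x :: (pvTakeRun false xs).1).map (fun l => PySem.Chars.strip l.toList))
            from by simp [pvSegment],
          show pvG true (x :: xs) = PySem.Chars.strip x.toList ++ pvG false xs from by
            simp [pvG, hxb]]
        conv_rhs => rw [hsplit]
        rw [pvG_nonblank_run _ _ hall, hprev]
        rw [List.map_cons, pvJoinSp_cons, List.map_map]
        simp only [List.append_assoc]
        rfl

-- ===== VERDICT (by name: the statement is the Claim_ definition above) =====
theorem fold_block_lines_spec : Claim_equal_fold_block_lines := by
  intro lines _
  unfold Spec_fold_block_lines fold_block_lines fold_block_lines_alt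
  rw [pvGroupsF_eq_g lines.length lines (le_refl _)]
  rw [pvFoldA_eq_g lines [] true (fun _ => rfl)]
  simp [PySem.Chars.join_nil]
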